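-- pv_equiv track=rewrite | github.com/wildgeece96/word2vec | app/01_clean_text.py | remove_explanation
-- ===== SOURCE A (Python) =====
-- symbol = "--------------------------------------------"
--
-- def remove_explanation(lines):
--     separate_symbol_cnt = 0
--     new_lines = []
--     for line in lines:
--         if separate_symbol_cnt < 2 and  symbol in line:
--             separate_symbol_cnt += 1
--             continue
--         elif separate_symbol_cnt >= 2:
--             new_lines.append(line)
--     if separate_symbol_cnt == 0:
--         return lines
--     return new_lines
-- ===== SOURCE B (Python) =====
-- symbol = "--------------------------------------------"
--
-- def remove_explanation(lines):
--     sep_idxs = [i for i, line in enumerate(lines) if symbol in line]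
--     if not sep_idxs:
--         return lines
--     if len(sep_idxs) < 2:
--         return []
--     return list(lines[sep_idxs[1] + 1:])
-- ===== Notes on version B (the rewrite author's own statement) =====
-- stated objective: alternative
-- what changed: Replaces A's single stateful pass with a counter and an accumulator that appends line by line, by collecting the indices of separator-containing lines once (enumerate + comprehension) and returning the slice of everything after the second such index (original list if no separator, empty list if only one).
import Mathlib
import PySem

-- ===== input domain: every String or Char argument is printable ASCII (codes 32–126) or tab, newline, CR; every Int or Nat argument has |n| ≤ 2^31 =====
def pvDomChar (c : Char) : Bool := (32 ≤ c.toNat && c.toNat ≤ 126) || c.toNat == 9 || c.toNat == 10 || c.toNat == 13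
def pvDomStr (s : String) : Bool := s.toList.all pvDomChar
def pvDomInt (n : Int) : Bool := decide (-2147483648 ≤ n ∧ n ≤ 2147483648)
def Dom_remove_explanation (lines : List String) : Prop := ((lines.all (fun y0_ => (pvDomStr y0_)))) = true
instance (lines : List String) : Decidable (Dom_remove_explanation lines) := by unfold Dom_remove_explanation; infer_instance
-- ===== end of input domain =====

-- B replaces A's stateful counter/accumulator pass by collecting the separator-line
-- indices once and slicing everything after the second one (objective: alternative decomposition).


-- ===== PORT A =====
def pySymbol : String := "--------------------------------------------"

-- one loop iteration of A: state = (separate_symbol_cnt, new_lines)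
def reStep (st : Int × List String) (line : String) : Int × List String :=
  if decide (st.1 < 2) && PySem.Str.isIn pySymbol line then (st.1 + 1, st.2)
  else if decide (st.1 ≥ 2) then (st.1, st.2 ++ [line])
  else st

def remove_explanation (lines : List String) : List String :=
  let st := lines.foldl reStep (0, [])
  if st.1 == 0 then lines else st.2

-- ===== PORT B =====
def remove_explanation_alt (lines : List String) : List String :=
  let sepIdxs := ((PySem.List.enumerate lines).filter
      (fun p => PySem.Str.isIn pySymbol p.2)).map (fun p => p.1)
  match sepIdxs with
  | [] => lines
  | [_] => []
  | _ :: j :: _ => PySem.List.slice lines (some (j + 1)) none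

-- ===== PRECONDITION & SPEC =====
def Spec_remove_explanation (lines : List String) (out : List String) : Prop := out = remove_explanation_alt lines
instance (lines : List String) (out : List String) : Decidable (Spec_remove_explanation lines out) := by unfold Spec_remove_explanation; infer_instance

-- ===== CLAIM (what is proved, stated in full; the proofs are below) =====
def Claim_equal_remove_explanation : Prop := ∀ (lines : List String), Dom_remove_explanation lines → Spec_remove_explanation lines (remove_explanation lines)

-- ===== LEMMAS AND PROOFS =====

-- proof-side normal form of 'symbol in line'
def csep (x : String) : Bool := PySem.Chars.isIn pySymbol.toList x.toList

lemma csep_unfold (x : String) : csep x = PySem.Chars.isIn pySymbol.toList x.toList := rfl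

-- suffix of xs strictly after the first separator line (empty if none)
def afterFirst : List String → List String
  | [] => []
  | x :: xs => if csep x then xs else afterFirst xs

-- the filtered enumeration B builds
def sepFilt (xs : List String) (s : Int) : List (Int × String) :=
  (PySem.List.enumerate xs s).filter (fun p => csep p.2)

lemma sepFilt_nil_iff (xs : List String) (s : Int) :
    sepFilt xs s = [] ↔ ∀ x ∈ xs, csep x = false := by
  induction xs generalizing s with
  | nil => simp [sepFilt, PySem.List.enumerate_nil]
  | cons x xs ih =>
    rw [sepFilt, PySem.List.enumerate_cons, List.filter_cons]
    by_cases h : csep x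
    · simp [h]
    · simp only [h, Bool.false_eq_true, if_false]
      rw [show List.filter (fun p => csep p.2) (PySem.List.enumerate xs (s+1)) = sepFilt xs (s+1) from rfl,
        ih (s+1)]
      simp [h]

lemma sepFilt_cons (xs : List String) (s : Int) (p : Int × String) (rest : List (Int × String))
    (h : sepFilt xs s = p :: rest) :
    s ≤ p.1 ∧ rest = sepFilt (afterFirst xs) (p.1 + 1) ∧
      xs.drop (p.1 - s + 1).toNat = afterFirst xs := by
  induction xs generalizing s with
  | nil => simp [sepFilt, PySem.List.enumerate_nil] at h
  | cons x xs ih =>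
    rw [sepFilt, PySem.List.enumerate_cons, List.filter_cons] at h
    have hrest : List.filter (fun p => csep p.2) (PySem.List.enumerate xs (s+1)) = sepFilt xs (s+1) := rfl
    by_cases hc : csep x
    · rw [if_pos (by simpa using hc)] at h
      obtain ⟨hp, hr⟩ := List.cons.inj h
      rw [hrest] at hr
      refine ⟨by simp [← hp], ?_, ?_⟩
      · rw [show afterFirst (x :: xs) = xs from by simp [afterFirst, hc], ← hp, ← hr]
      · rw [show afterFirst (x :: xs) = xs from by simp [afterFirst, hc], ← hp]
        simp
    · rw [if_neg (by simpa using hc)] at h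
      rw [hrest] at h
      obtain ⟨h1, h2, h3⟩ := ih (s+1) h
      have haf : afterFirst (x :: xs) = afterFirst xs := by
        simp [afterFirst, hc]
      refine ⟨by omega, by rw [haf]; exact h2, ?_⟩
      rw [haf, ← h3]
      have : (p.1 - s + 1).toNat = (p.1 - (s+1) + 1).toNat + 1 := by omega
      rw [this, List.drop_succ_cons]

-- A's loop once the counter is ≥ 2: appends every remaining line
lemma foldl_ge_two (xs : List String) (k : Int) (acc : List String) (hk : 2 ≤ k) :
    xs.foldl reStep (k, acc) = (k, acc ++ xs) := by
  induction xs generalizing acc with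
  | nil => simp
  | cons x xs ih =>
    have hs : reStep (k, acc) x = (k, acc ++ [x]) := by
      have h1 : ¬ (k < 2) := by omega
      simp [reStep, h1, hk]
    rw [List.foldl_cons, hs, ih (acc ++ [x])]
    simp

-- A's loop with counter < 2 over separator-free lines: state unchanged
lemma foldl_no_sep (xs : List String) (k : Int) (acc : List String) (hk : k < 2)
    (h : ∀ x ∈ xs, csep x = false) :
    xs.foldl reStep (k, acc) = (k, acc) := by
  induction xs with
  | nil => simp
  | cons x xs ih =>
    have hs : reStep (k, acc) x = (k, acc) := by
      have hx := h x (by simp)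
      have h2 : ¬ (k ≥ 2) := by omega
      simp [reStep, ← csep_unfold, hx, h2]
    rw [List.foldl_cons, hs]
    exact ih (fun y hy => h y (List.mem_cons_of_mem _ hy))

-- A's loop with counter 1, when a separator remains: lands at 2 and appends the rest
lemma foldl_one (xs : List String) (acc : List String)
    (h : ¬ ∀ x ∈ xs, csep x = false) :
    xs.foldl reStep (1, acc) = (2, acc ++ afterFirst xs) := by
  induction xs with
  | nil => simp at h
  | cons x xs ih =>
    by_cases hc : csep x
    · have hs : reStep (1, acc) x = (2, acc) := by
        simp [reStep, ← csep_unfold, hc]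
      rw [List.foldl_cons, hs, foldl_ge_two xs 2 acc le_rfl,
        show afterFirst (x :: xs) = xs from by simp [afterFirst, hc]]
    · have hs : reStep (1, acc) x = (1, acc) := by
        simp [reStep, ← csep_unfold, hc]
      rw [List.foldl_cons, hs,
        show afterFirst (x :: xs) = afterFirst xs from by simp [afterFirst, hc]]
      refine ih ?_
      intro hall
      refine h ?_
      intro y hy
      rcases List.mem_cons.mp hy with h' | h'
      · rw [h']; exact eq_false_of_ne_true (by simpa using hc)
      · exact hall y h'

-- A's loop from the start, when a separator exists: skip to after the first one
lemma foldl_zero (xs : List String)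
    (h : ¬ ∀ x ∈ xs, csep x = false) :
    xs.foldl reStep (0, []) = (afterFirst xs).foldl reStep (1, []) := by
  induction xs with
  | nil => simp at h
  | cons x xs ih =>
    by_cases hc : csep x
    · have hs : reStep (0, []) x = (1, []) := by
        simp [reStep, ← csep_unfold, hc]
      rw [List.foldl_cons, hs,
        show afterFirst (x :: xs) = xs from by simp [afterFirst, hc]]
    · have hs : reStep (0, ([] : List String)) x = (0, []) := by
        simp [reStep, ← csep_unfold, hc]
      rw [List.foldl_cons, hs,
        show afterFirst (x :: xs) = afterFirst xs from by simp [afterFirst, hc]]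
      refine ih ?_
      intro hall
      refine h ?_
      intro y hy
      rcases List.mem_cons.mp hy with h' | h'
      · rw [h']; exact eq_false_of_ne_true (by simpa using hc)
      · exact hall y h'

-- ===== VERDICT (by name: the statement is the Claim_ definition above) =====
theorem remove_explanation_spec : Claim_equal_remove_explanation := by
  intro lines _
  unfold Spec_remove_explanation remove_explanation remove_explanation_alt
  have hmap : ((PySem.List.enumerate lines).filter
      (fun p => PySem.Str.isIn pySymbol p.2)).map (fun p => p.1)
      = (sepFilt lines 0).map (fun p => p.1) := rfl
  rw [hmap]
  cases hF : sepFilt lines 0 with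
  | nil =>
    have hno := (sepFilt_nil_iff lines 0).mp hF
    rw [foldl_no_sep lines 0 [] (by omega) hno]
    simp
  | cons p tl =>
    have hsep : ¬ ∀ x ∈ lines, csep x = false := by
      intro hall
      rw [(sepFilt_nil_iff lines 0).mpr hall] at hF
      simp at hF
    obtain ⟨hp0, htl, hdrop1⟩ := sepFilt_cons lines 0 p tl hF
    cases tl with
    | nil =>
      have hno2 := (sepFilt_nil_iff (afterFirst lines) (p.1+1)).mp htl.symm
      rw [foldl_zero lines hsep, foldl_no_sep _ 1 [] (by omega) hno2]
      simp
    | cons q tl2 =>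
      have hsep2 : ¬ ∀ x ∈ afterFirst lines, csep x = false := by
        intro hall
        rw [(sepFilt_nil_iff (afterFirst lines) (p.1+1)).mpr hall] at htl
        simp at htl
      obtain ⟨hq0, _, hdrop2⟩ := sepFilt_cons (afterFirst lines) (p.1+1) q tl2 htl.symm
      rw [foldl_zero lines hsep, foldl_one _ [] hsep2]
      simp only [List.map_cons, List.nil_append]
      rw [show ((2:Int) == 0) = false from by decide]
      simp only [Bool.false_eq_true, if_false]
      rw [PySem.List.slice_from lines (by omega : (0:Int) ≤ q.1 + 1)]
      rw [← hdrop2, ← hdrop1, List.drop_drop]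
      congr 1
      omega
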